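-- pv_equiv track=rewrite | github.com/ysyecust/codeboard | codeboard.py | preprocess_argv
-- ===== SOURCE A (Python) =====
-- GLOBAL_FLAGS = {"--path", "--sort", "--filter", "--json", "--watch", "--lang", "--no-color"}
--
-- GLOBAL_FLAGS_WITH_VALUE = {"--path", "--sort", "--filter", "--watch", "--lang"}
--
-- def preprocess_argv(argv: list[str]) -> list[str]:
--     """将全局选项移到子命令之前，允许 `cb health --filter foo` 的用法"""
--     subcommands = {
--         "dashboard", "activity", "health", "detail", "stats",
--         "open", "dirty", "each", "pull", "push", "commit", "stash", "grep",
--         "doc", "graph", "config", "completions",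
--     }
--     # 找到子命令位置
--     sub_idx = None
--     for i, arg in enumerate(argv):
--         if arg in subcommands:
--             sub_idx = i
--             break
--     if sub_idx is None:
--         return argv
--
--     before = argv[:sub_idx]
--     subcmd = argv[sub_idx]
--     after = argv[sub_idx + 1:]
--
--     # 从 after 中提取全局选项，移到 before
--     new_after = []
--     i = 0
--     while i < len(after):
--         arg = after[i]
--         if arg in GLOBAL_FLAGS:
--             before.append(arg)
--             if arg in GLOBAL_FLAGS_WITH_VALUE and i + 1 < len(after):
--                 before.append(after[i + 1])
--                 i += 2
--             else:
--                 i += 1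
--         else:
--             new_after.append(arg)
--             i += 1
--
--     return before + [subcmd] + new_after
-- ===== SOURCE B (Python) =====
-- GLOBAL_FLAGS = {"--path", "--sort", "--filter", "--json", "--watch", "--lang", "--no-color"}
--
-- GLOBAL_FLAGS_WITH_VALUE = {"--path", "--sort", "--filter", "--watch", "--lang"}
--
-- def preprocess_argv(argv: list[str]) -> list[str]:
--     """Stack-based split, then chunk the tail into flag[+value] units and stably
--     partition the chunks by flag-ness around the subcommand (no index arithmetic)."""
--     subcommands = {
--         "dashboard", "activity", "health", "detail", "stats",
--         "open", "dirty", "each", "pull", "push", "commit", "stash", "grep",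
--         "doc", "graph", "config", "completions",
--     }
--     stack = list(reversed(argv))
--     head = []
--     sub = None
--     while stack:
--         tok = stack.pop()
--         if tok in subcommands:
--             sub = tok
--             break
--         head.append(tok)
--     if sub is None:
--         return argv
--     # stage 1: group what follows the subcommand into units: a value-taking
--     # global flag binds the token after it, everything else is a unit by itself
--     chunks = []
--     while stack:
--         tok = stack.pop()
--         if tok in GLOBAL_FLAGS_WITH_VALUE and stack:
--             chunks.append([tok, stack.pop()])
--         else:
--             chunks.append([tok])
--     # stage 2: stable partition of whole units by whether they start with a global flag
--     moved = [t for c in chunks if c[0] in GLOBAL_FLAGS for t in c]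
--     kept = [t for c in chunks if c[0] not in GLOBAL_FLAGS for t in c]
--     return head + moved + [sub] + kept
-- ===== Notes on version B (the rewrite author's own statement) =====
-- stated objective: alternative
-- what changed: Replaces A's index search, list slicing and index-stepped while loop that routes tokens directly into before/new_after by staged passes: a stack-pop split at the subcommand, a chunking pass that groups the tail into flag[+value] units, and a stable partition of whole chunks by flag-ness flattened around the subcommand.
import Mathlib
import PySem

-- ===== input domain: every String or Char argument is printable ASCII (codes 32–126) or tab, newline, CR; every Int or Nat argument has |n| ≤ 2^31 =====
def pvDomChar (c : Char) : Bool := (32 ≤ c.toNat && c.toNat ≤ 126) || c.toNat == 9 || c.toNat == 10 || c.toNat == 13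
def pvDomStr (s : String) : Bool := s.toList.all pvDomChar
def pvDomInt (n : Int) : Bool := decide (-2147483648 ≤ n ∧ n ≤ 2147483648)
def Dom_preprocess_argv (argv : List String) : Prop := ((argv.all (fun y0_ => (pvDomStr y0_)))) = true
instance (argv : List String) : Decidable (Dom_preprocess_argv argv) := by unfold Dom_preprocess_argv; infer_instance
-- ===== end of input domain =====

-- B replaces A's index search + slicing + index-stepped routing loop by staged passes:
-- split off the subcommand, chunk the tail into flag[+value] units, then stably partition
-- whole units by flag-ness; objective: alternative (same O(n) cost, different decomposition).

-- ===== PORT A =====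
def pvGlobalFlags : PySem.Set String :=
  PySem.Set.ofList ["--path", "--sort", "--filter", "--json", "--watch", "--lang", "--no-color"]

def pvGlobalFlagsWithValue : PySem.Set String :=
  PySem.Set.ofList ["--path", "--sort", "--filter", "--watch", "--lang"]

def pvSubcommands : PySem.Set String :=
  PySem.Set.ofList ["dashboard", "activity", "health", "detail", "stats",
    "open", "dirty", "each", "pull", "push", "commit", "stash", "grep",
    "doc", "graph", "config", "completions"]

-- the 'for i, arg in enumerate(argv): if arg in subcommands: sub_idx = i; break' loop
def pvA_findSub : List String → Nat → Option Nat
  | [], _ => none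
  | a :: rest, i => if pvSubcommands.contains a then some i else pvA_findSub rest (i + 1)

-- the 'while i < len(after)' loop, returning (before, new_after); getD is safe: i < length checked
def pvA_while (after : List String) (before new_after : List String) (i : Nat) :
    List String × List String :=
  if h : i < after.length then
    let arg := after.getD i ""
    if pvGlobalFlags.contains arg then
      if pvGlobalFlagsWithValue.contains arg ∧ i + 1 < after.length then
        pvA_while after (before ++ [arg, after.getD (i + 1) ""]) new_after (i + 2)
      else
        pvA_while after (before ++ [arg]) new_after (i + 1)
    else
      pvA_while after before (new_after ++ [arg]) (i + 1)
  else (before, new_after)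
termination_by after.length - i
decreasing_by all_goals omega

def preprocess_argv (argv : List String) : List String :=
  match pvA_findSub argv 0 with
  | none => argv
  | some sub_idx =>
    let before := argv.take sub_idx          -- argv[:sub_idx]
    let subcmd := argv.getD sub_idx ""       -- argv[sub_idx]; sub_idx returned in range
    let after := argv.drop (sub_idx + 1)     -- argv[sub_idx+1:]
    let (b, na) := pvA_while after before [] 0
    b ++ [subcmd] ++ na

-- ===== PORT B =====
-- the first 'while stack' loop: stack = reversed argv, pop = take the head; returns
-- (head, sub, remaining stack) or none when the stack is exhausted without a subcommand
def pvB_split : List String → List String → Option (List String × String × List String)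
  | [], _ => none
  | tok :: rest, head =>
    if pvSubcommands.contains tok then some (head, tok, rest)
    else pvB_split rest (head ++ [tok])

-- the second 'while stack' loop: chunk the remainder into units ('tok in WITH_VALUE and stack'
-- pairs the flag with the popped next token, otherwise a singleton unit)
def pvB_chunk : List String → List (List String)
  | [] => []
  | [tok] => [[tok]]
  | tok :: v :: rest =>
    if pvGlobalFlagsWithValue.contains tok then [tok, v] :: pvB_chunk rest
    else [tok] :: pvB_chunk (v :: rest)

def preprocess_argv_alt (argv : List String) : List String :=
  match pvB_split argv [] with
  | none => argv
  | some (head, sub, after) =>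
    let chunks := pvB_chunk after
    let moved := (chunks.filter (fun c => pvGlobalFlags.contains (c.headD ""))).flatten
    let kept := (chunks.filter (fun c => !pvGlobalFlags.contains (c.headD ""))).flatten
    head ++ moved ++ [sub] ++ kept

-- ===== PRECONDITION & SPEC =====
def Spec_preprocess_argv (argv : List String) (out : List String) : Prop := out = preprocess_argv_alt argv
instance (argv : List String) (out : List String) : Decidable (Spec_preprocess_argv argv out) := by unfold Spec_preprocess_argv; infer_instance

-- ===== CLAIM (what is proved, stated in full; the proofs are below) =====
def Claim_equal_preprocess_argv : Prop := ∀ (argv : List String), Dom_preprocess_argv argv → Spec_preprocess_argv argv (preprocess_argv argv)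

-- ===== LEMMAS AND PROOFS =====

lemma pvA_while_shift (x : String) :
    ∀ (k : Nat) (l b n : List String) (i : Nat), l.length - i ≤ k →
      pvA_while (x :: l) b n (i + 1) = pvA_while l b n i := by
  intro k
  induction k with
  | zero =>
    intro l b n i hk
    rw [pvA_while, pvA_while]
    simp only [List.length_cons]
    rw [dif_neg (by omega), dif_neg (by omega)]
  | succ k ih =>
    intro l b n i hk
    by_cases h : i < l.length
    · rw [pvA_while, pvA_while]
      simp only [List.length_cons, List.getD_cons_succ]
      rw [dif_pos (by omega : i + 1 < l.length + 1), dif_pos h]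
      split_ifs with hg h1 h2 h3
      · rw [show i + 1 + 2 = i + 2 + 1 from by omega]
        exact ih _ _ _ _ (by omega)
      · exact absurd ⟨h1.1, by omega⟩ h2
      · exact absurd ⟨h3.1, by omega⟩ h1
      · exact ih _ _ _ _ (by omega)
      · exact ih _ _ _ _ (by omega)
    · rw [pvA_while, pvA_while]
      simp only [List.length_cons]
      rw [dif_neg (by omega), dif_neg (by omega)]

lemma pvA_while_shift' (x : String) (l b n : List String) (i : Nat) :
    pvA_while (x :: l) b n (i + 1) = pvA_while l b n i :=
  pvA_while_shift x l.length l b n i (by omega)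

-- one unfold of A's while loop at i = 0, in list-structural form
lemma pvA_while_cons (a : String) (l b n : List String) :
    pvA_while (a :: l) b n 0 =
      if pvGlobalFlags.contains a then
        if pvGlobalFlagsWithValue.contains a then
          match l with
          | [] => (b ++ [a], n)
          | v :: l' => pvA_while l' (b ++ [a, v]) n 0
        else pvA_while l (b ++ [a]) n 0
      else pvA_while l b (n ++ [a]) 0 := by
  conv_lhs => rw [pvA_while.eq_def]
  simp only [List.length_cons, List.getD_cons_zero, Nat.zero_add]
  rw [dif_pos (by omega : 0 < l.length + 1)]
  by_cases hg : pvGlobalFlags.contains a = true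
  · rw [if_pos hg, if_pos hg]
    by_cases hv : pvGlobalFlagsWithValue.contains a = true
    · rw [if_pos hv]
      match l with
      | [] =>
        rw [if_neg (show ¬(pvGlobalFlagsWithValue.contains a = true ∧
              1 < List.length ([] : List String) + 1) from fun h => by
            exact absurd h.2 (by simp))]
        rw [pvA_while.eq_def]
        simp
      | v :: l' =>
        rw [if_pos (show pvGlobalFlagsWithValue.contains a = true ∧
              1 < List.length (v :: l') + 1 from ⟨hv, by simp⟩)]
        simp only [List.getD_cons_succ, List.getD_cons_zero]
        rw [show (2 : Nat) = 1 + 1 from rfl, pvA_while_shift' a,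
          show (1 : Nat) = 0 + 1 from rfl, pvA_while_shift' v]
    · rw [if_neg hv,
        if_neg (show ¬(pvGlobalFlagsWithValue.contains a = true ∧ 1 < l.length + 1) from
          fun h => hv h.1)]
      rw [show (1 : Nat) = 0 + 1 from rfl, pvA_while_shift' a]
  · rw [if_neg hg, if_neg hg]
    rw [show (1 : Nat) = 0 + 1 from rfl, pvA_while_shift' a]

-- the five value-taking flags are all global flags
lemma pvWV_sub (s : String) (h : pvGlobalFlagsWithValue.contains s = true) :
    pvGlobalFlags.contains s = true := by
  have e : (pvGlobalFlagsWithValue : List String) =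
      ["--path", "--sort", "--filter", "--watch", "--lang"] := by decide
  have h' : s ∈ (pvGlobalFlagsWithValue : List String) := by
    simpa [PySem.Set.contains] using h
  rw [e] at h'
  simp only [List.mem_cons, List.not_mem_nil, or_false] at h'
  rcases h' with rfl | rfl | rfl | rfl | rfl <;> decide

-- A's routing loop computes exactly B's chunk-partition
lemma pvA_while_chunks :
    ∀ (k : Nat) (l : List String), l.length ≤ k → ∀ (b n : List String),
      pvA_while l b n 0 =
        (b ++ ((pvB_chunk l).filter (fun c => pvGlobalFlags.contains (c.headD ""))).flatten,
         n ++ ((pvB_chunk l).filter (fun c => !pvGlobalFlags.contains (c.headD ""))).flatten) := by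
  intro k
  induction k with
  | zero =>
    intro l hl b n
    obtain rfl : l = [] := List.eq_nil_of_length_eq_zero (Nat.le_zero.mp hl)
    rw [pvA_while.eq_def, pvB_chunk]
    simp
  | succ k ih =>
    intro l hl b n
    match l with
    | [] =>
      rw [pvA_while.eq_def, pvB_chunk]
      simp
    | [a] =>
      rw [pvA_while_cons, pvB_chunk]
      by_cases hg : pvGlobalFlags.contains a = true
      · have hg' : a ∈ pvGlobalFlags := by simpa [PySem.Set.contains] using hg
        rw [if_pos hg]
        by_cases hv : pvGlobalFlagsWithValue.contains a = true
        · rw [if_pos hv]; simp [hg']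
        · rw [if_neg hv, ih [] (by simp) (b ++ [a]) n]
          simp [pvB_chunk, hg']
      · have hg' : a ∉ pvGlobalFlags := by simpa [PySem.Set.contains] using hg
        rw [if_neg hg, ih [] (by simp) b (n ++ [a])]
        simp [pvB_chunk, hg']
    | a :: v :: l' =>
      have hl' : l'.length ≤ k := by simp only [List.length_cons] at hl; omega
      have hvl' : (v :: l').length ≤ k := by simp only [List.length_cons] at hl ⊢; omega
      rw [pvA_while_cons, pvB_chunk]
      by_cases hv : pvGlobalFlagsWithValue.contains a = true
      · have hg := pvWV_sub a hv
        have hg' : a ∈ pvGlobalFlags := by simpa [PySem.Set.contains] using hg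
        rw [if_pos hg, if_pos hv, if_pos hv]
        show pvA_while l' (b ++ [a, v]) n 0 = _
        rw [ih l' hl' (b ++ [a, v]) n]
        simp [hg']
      · rw [if_neg hv, if_neg hv]
        by_cases hg : pvGlobalFlags.contains a = true
        · have hg' : a ∈ pvGlobalFlags := by simpa [PySem.Set.contains] using hg
          rw [if_pos hg, ih (v :: l') hvl' (b ++ [a]) n]
          simp [hg']
        · have hg' : a ∉ pvGlobalFlags := by simpa [PySem.Set.contains] using hg
          rw [if_neg hg, ih (v :: l') hvl' b (n ++ [a])]
          simp [hg']

lemma pvA_findSub_add :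
    ∀ (l : List String) (i : Nat), pvA_findSub l i = (pvA_findSub l 0).map (· + i) := by
  intro l
  induction l with
  | nil => intro i; rfl
  | cons a rest ih =>
    intro i
    rw [pvA_findSub, pvA_findSub]
    split_ifs with hs
    · simp
    · rw [ih (i + 1), ih 1]
      cases pvA_findSub rest 0 with
      | none => rfl
      | some j => simp; omega

-- B's split loop in terms of A's index search
lemma pvB_split_eq :
    ∀ (argv acc : List String),
      pvB_split argv acc =
        (pvA_findSub argv 0).map
          (fun i => (acc ++ argv.take i, argv.getD i "", argv.drop (i + 1))) := by
  intro argv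
  induction argv with
  | nil => intro acc; rfl
  | cons a rest ih =>
    intro acc
    rw [pvB_split, pvA_findSub]
    split_ifs with hs
    · simp
    · rw [ih (acc ++ [a]), pvA_findSub_add rest 1]
      cases pvA_findSub rest 0 with
      | none => rfl
      | some j => simp

-- ===== VERDICT (by name: the statement is the Claim_ definition above) =====
theorem preprocess_argv_spec : Claim_equal_preprocess_argv := by
  intro argv _
  unfold Spec_preprocess_argv preprocess_argv preprocess_argv_alt
  rw [pvB_split_eq argv []]
  cases h : pvA_findSub argv 0 with
  | none => simp
  | some si =>
    simp only [Option.map_some]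
    rw [pvA_while_chunks (argv.drop (si + 1)).length _ (le_refl _)]
    simp
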